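-- pv_equiv track=rewrite | github.com/EnesGumuskaynak/micro-action-recognition | hierarchical_yoga_recognition_minicpm_v.py | extract_from_response
-- ===== SOURCE A (Python) =====
-- def extract_from_response(response, field_name):
--     """
--     LLM yanıtından belirli bir alanı çıkartır
--
--     Args:
--         response: Model'in yanıtı
--         field_name: Çıkarılacak alanın adı (örn. "Main Category", "Subcategory", "Specific Pose")
--
--     Returns:
--         str: Alandan çıkarılan değer, eğer bulunamazsa None
--     """
--     if not response:
--         return None
--
--     # Yanıtı satırlara böl
--     lines = response.strip().split("\n")
--
--     # İlk denemede tam eşleşme ara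
--     for line in lines:
--         if line.lower().startswith(field_name.lower() + ":"):
--             return line.split(":", 1)[1].strip()
--
--     # Tam eşleşme bulunamazsa, içeren satırları ara
--     for line in lines:
--         if field_name.lower() in line.lower() and ":" in line:
--             return line.split(":", 1)[1].strip()
--
--     # Eğer field_name içeren bir şey yoksa ve ":" içeren bir satır varsa, son çare olarak onu al
--     for line in lines:
--         if ":" in line:
--             parts = line.split(":", 1)
--             if len(parts) > 1 and field_name.lower() in parts[0].lower():
--                 return parts[1].strip()
--
--     return None
-- ===== SOURCE B (Python) =====
-- def extract_from_response(response, field_name):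
--     """One pass over the lines, keeping the best-priority match (1 = exact
--     prefix, 2 = containment); earliest line within a tier wins."""
--     if not response:
--         return None
--
--     target = field_name.lower()
--     best = None  # (priority, extracted value)
--     for line in response.strip().split("\n"):
--         low = line.lower()
--         if low.startswith(target + ":"):
--             prio = 1
--         elif target in low and ":" in line:
--             prio = 2
--         else:
--             continue
--         if best is None or prio < best[0]:
--             best = (prio, line.split(":", 1)[1].strip())
--     return best[1] if best is not None else None
-- ===== Notes on version B (the rewrite author's own statement) =====
-- stated objective: simpler
-- what changed: Replaces A's three sequential scans over the lines (exact-prefix pass, containment pass, and a third pass that is provably dead) with a single pass that keeps the best-priority match, updating only on strictly smaller priority so the earliest line within a tier wins.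
import Mathlib
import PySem

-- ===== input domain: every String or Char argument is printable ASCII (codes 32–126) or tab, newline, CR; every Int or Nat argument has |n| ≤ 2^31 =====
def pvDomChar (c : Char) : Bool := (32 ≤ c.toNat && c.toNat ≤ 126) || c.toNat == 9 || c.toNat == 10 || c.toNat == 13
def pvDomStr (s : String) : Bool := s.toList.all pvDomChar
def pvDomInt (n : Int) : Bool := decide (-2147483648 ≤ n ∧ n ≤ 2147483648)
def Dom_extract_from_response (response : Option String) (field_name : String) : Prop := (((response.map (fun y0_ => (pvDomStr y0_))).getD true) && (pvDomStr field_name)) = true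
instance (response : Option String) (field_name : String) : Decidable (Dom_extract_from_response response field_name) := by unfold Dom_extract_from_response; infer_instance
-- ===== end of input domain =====

-- B replaces A's three sequential scans over the lines with a single pass keeping the
-- best-priority match (objective: simpler — one loop, and A's third pass is dead code).

-- ===== PORT A =====
-- line.split(":", 1)[1].strip() — both Pythons evaluate this only on lines already known
-- to contain ':' (so index 1 exists and the .getD [] default is never the value used).
def pvAfterColon (l : List Char) : List Char :=
  PySem.Chars.strip ((PySem.List.pyGet? (PySem.Chars.splitOnMax l [':'] 1) 1).getD [])

-- first loop: exact 'field:'-prefix match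
def pvLoopA1 (fl : List Char) : List (List Char) → Option (List Char)
  | [] => none
  | l :: rest =>
    if PySem.Chars.startswith (PySem.Chars.lower l) (fl ++ [':']) then some (pvAfterColon l)
    else pvLoopA1 fl rest

-- second loop: containment match
def pvLoopA2 (fl : List Char) : List (List Char) → Option (List Char)
  | [] => none
  | l :: rest =>
    if PySem.Chars.isIn fl (PySem.Chars.lower l) && PySem.Chars.isIn [':'] l then
      some (pvAfterColon l)
    else pvLoopA2 fl rest

-- third loop: field name contained in the part before the ':'
def pvLoopA3 (fl : List Char) : List (List Char) → Option (List Char)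
  | [] => none
  | l :: rest =>
    if PySem.Chars.isIn [':'] l then
      let parts := PySem.Chars.splitOnMax l [':'] 1
      if parts.length > 1 &&
          PySem.Chars.isIn fl (PySem.Chars.lower ((PySem.List.pyGet? parts 0).getD [])) then
        some (PySem.Chars.strip ((PySem.List.pyGet? parts 1).getD []))
      else pvLoopA3 fl rest
    else pvLoopA3 fl rest

def extract_from_response (response : Option String) (field_name : String) : Option String :=
  match response with
  | none => none
  | some r =>
    if r.toList = [] then none   -- 'if not response'
    else
      let lines := PySem.Chars.splitOn (PySem.Chars.strip r.toList) ['\n']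
      let fl := PySem.Chars.lower field_name.toList
      match pvLoopA1 fl lines with
      | some v => some (String.ofList v)
      | none =>
        match pvLoopA2 fl lines with
        | some v => some (String.ofList v)
        | none =>
          match pvLoopA3 fl lines with
          | some v => some (String.ofList v)
          | none => none

-- ===== PORT B =====
-- one iteration of B's single loop: compute the line's priority (1 exact, 2 containment,
-- none = skip) and update the best only on a strictly smaller priority
def pvStepB (fl : List Char) (best : Option (Nat × List Char)) (l : List Char) :
    Option (Nat × List Char) :=
  let low := PySem.Chars.lower l
  let prio? : Option Nat :=
    if PySem.Chars.startswith low (fl ++ [':']) then some 1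
    else if PySem.Chars.isIn fl low && PySem.Chars.isIn [':'] l then some 2
    else none
  match prio? with
  | none => best
  | some p =>
    match best with
    | none => some (p, pvAfterColon l)
    | some (bp, bv) => if p < bp then some (p, pvAfterColon l) else some (bp, bv)

def extract_from_response_alt (response : Option String) (field_name : String) : Option String :=
  match response with
  | none => none
  | some r =>
    if r.toList = [] then none   -- 'if not response'
    else
      match (PySem.Chars.splitOn (PySem.Chars.strip r.toList) ['\n']).foldl
          (pvStepB (PySem.Chars.lower field_name.toList)) none with
      | none => none
      | some (_, v) => some (String.ofList v)

-- ===== PRECONDITION & SPEC =====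
def Spec_extract_from_response (response : Option String) (field_name : String) (out : Option String) : Prop := out = extract_from_response_alt response field_name
instance (response : Option String) (field_name : String) (out : Option String) : Decidable (Spec_extract_from_response response field_name out) := by unfold Spec_extract_from_response; infer_instance

-- ===== CLAIM (what is proved, stated in full; the proofs are below) =====
def Claim_equal_extract_from_response : Prop := ∀ (response : Option String) (field_name : String), Dom_extract_from_response response field_name → Spec_extract_from_response response field_name (extract_from_response response field_name)

-- ===== LEMMAS AND PROOFS =====

-- a best of priority 1 is never displaced
theorem pvStepB_one (fl : List Char) (v l : List Char) :
    pvStepB fl (some (1, v)) l = some (1, v) := by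
  simp only [pvStepB]
  split_ifs <;> simp

theorem pvFoldB_one (fl v : List Char) (lines : List (List Char)) :
    lines.foldl (pvStepB fl) (some (1, v)) = some (1, v) := by
  induction lines with
  | nil => rfl
  | cons l rest ih => simp [List.foldl_cons, pvStepB_one, ih]

-- a best of priority 2 is displaced exactly by the first exact match
theorem pvFoldB_two (fl v : List Char) (lines : List (List Char)) :
    lines.foldl (pvStepB fl) (some (2, v)) =
      match pvLoopA1 fl lines with
      | some w => some (1, w)
      | none => some (2, v) := by
  induction lines with
  | nil => rfl
  | cons l rest ih =>
    by_cases h1 : PySem.Chars.startswith (PySem.Chars.lower l) (fl ++ [':']) = true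
    · simp [List.foldl_cons, pvStepB, h1, pvLoopA1, pvFoldB_one]
    · by_cases h2 : (PySem.Chars.isIn fl (PySem.Chars.lower l) &&
          PySem.Chars.isIn [':'] l) = true
      · simp [List.foldl_cons, pvStepB, h1, h2, pvLoopA1, ih]
      · simp [List.foldl_cons, pvStepB, h1, h2, pvLoopA1, ih]

-- B's fold, started empty, computes: first exact match, else first containment match
theorem pvFoldB_none (fl : List Char) (lines : List (List Char)) :
    lines.foldl (pvStepB fl) none =
      match pvLoopA1 fl lines with
      | some w => some (1, w)
      | none =>
        match pvLoopA2 fl lines with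
        | some w => some (2, w)
        | none => none := by
  induction lines with
  | nil => rfl
  | cons l rest ih =>
    by_cases h1 : PySem.Chars.startswith (PySem.Chars.lower l) (fl ++ [':']) = true
    · simp [List.foldl_cons, pvStepB, h1, pvLoopA1, pvFoldB_one]
    · by_cases h2 : (PySem.Chars.isIn fl (PySem.Chars.lower l) &&
          PySem.Chars.isIn [':'] l) = true
      · simp [List.foldl_cons, pvStepB, h1, h2, pvLoopA1, pvLoopA2, pvFoldB_two]
      · simp [List.foldl_cons, pvStepB, h1, h2, pvLoopA1, pvLoopA2, ih]

-- once the accumulator of splitOnMax.go is nonempty, the HEAD of the final result is fixed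
theorem pvGo_head_ne (sep : List Char) (fuel : Nat) :
    ∀ (m : Nat) (l cur : List Char) (acc : List (List Char)), acc ≠ [] →
      (PySem.Chars.splitOnMax.go sep fuel m l cur acc).head? = acc.getLast? := by
  induction fuel with
  | zero =>
    intro m l cur acc hacc
    obtain ⟨a, ha⟩ := Option.isSome_iff_exists.mp (List.getLast?_isSome.mpr hacc)
    simp [PySem.Chars.splitOnMax.go, ha]
  | succ fuel ih =>
    intro m l cur acc hacc
    obtain ⟨a, ha⟩ := Option.isSome_iff_exists.mp (List.getLast?_isSome.mpr hacc)
    have h2 : (cur.reverse :: acc).getLast? = acc.getLast? := by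
      cases acc with
      | nil => cases hacc rfl
      | cons b bs => simp
    cases l with
    | nil => simp [PySem.Chars.splitOnMax.go, ha]
    | cons c rest =>
      by_cases hm : m = 0
      · simp [PySem.Chars.splitOnMax.go, hm, ha]
      · by_cases hp : sep.isPrefixOf (c :: rest) = true
        · simp [PySem.Chars.splitOnMax.go, hm, hp,
            ih _ _ _ _ (List.cons_ne_nil _ _), h2]
        · simp [PySem.Chars.splitOnMax.go, hm, hp, ih _ _ _ _ hacc]
  
-- with an empty accumulator, the head of splitOnMax.go is cur.reverse ++ (a prefix of l)
theorem pvGo_head_nil (sep : List Char) (fuel : Nat) :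
    ∀ (m : Nat) (l cur : List Char),
      ∃ t, t <+: l ∧
        (PySem.Chars.splitOnMax.go sep fuel m l cur []).head? = some (cur.reverse ++ t) := by
  induction fuel with
  | zero =>
    intro m l cur
    exact ⟨l, List.prefix_refl l, by simp [PySem.Chars.splitOnMax.go]⟩
  | succ fuel ih =>
    intro m l cur
    cases l with
    | nil => exact ⟨[], List.nil_prefix, by simp [PySem.Chars.splitOnMax.go]⟩
    | cons c rest =>
      by_cases hm : m = 0
      · exact ⟨c :: rest, List.prefix_refl _, by simp [PySem.Chars.splitOnMax.go, hm]⟩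
      · by_cases hp : sep.isPrefixOf (c :: rest) = true
        · refine ⟨[], List.nil_prefix, ?_⟩
          simp [PySem.Chars.splitOnMax.go, hm, hp,
            pvGo_head_ne sep fuel _ _ _ _ (List.cons_ne_nil _ _)]
        · obtain ⟨t, ht, hh⟩ := ih m rest (c :: cur)
          refine ⟨c :: t, List.cons_prefix_cons.mpr ⟨rfl, ht⟩, ?_⟩
          simp [PySem.Chars.splitOnMax.go, hm, hp, hh]
  
-- parts[0] of line.split(":", 1) is a prefix of the line
theorem pvParts0_prefix (l : List Char) :
    ((PySem.List.pyGet? (PySem.Chars.splitOnMax l [':'] 1) 0).getD []) <+: l := by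
  obtain ⟨t, ht, hh⟩ := pvGo_head_nil [':'] (l.length + 1) 1 l []
  have : PySem.Chars.splitOnMax l [':'] 1 = PySem.Chars.splitOnMax.go [':'] (l.length + 1) 1 l [] [] := by
    simp [PySem.Chars.splitOnMax]
  rw [this]
  cases hres : PySem.Chars.splitOnMax.go [':'] (l.length + 1) 1 l [] [] with
  | nil => simp [hres] at hh
  | cons p ps =>
    rw [hres] at hh
    simp at hh
    simpa [PySem.List.pyGet?, PySem.List.pyIdx?, hh] using ht

-- A's third loop never fires when the second returned none
theorem pvLoopA3_none (fl : List Char) (lines : List (List Char))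
    (h : pvLoopA2 fl lines = none) : pvLoopA3 fl lines = none := by
  induction lines with
  | nil => rfl
  | cons l rest ih =>
    rw [pvLoopA2] at h
    by_cases h2 : (PySem.Chars.isIn fl (PySem.Chars.lower l) &&
        PySem.Chars.isIn [':'] l) = true
    · rw [if_pos h2] at h; exact absurd h (by simp)
    · rw [if_neg h2] at h
      rw [pvLoopA3]
      by_cases hc : PySem.Chars.isIn [':'] l = true
      · rw [if_pos hc]
        have hfalse : ¬ ((PySem.Chars.splitOnMax l [':'] 1).length > 1 &&
            PySem.Chars.isIn fl (PySem.Chars.lower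
              ((PySem.List.pyGet? (PySem.Chars.splitOnMax l [':'] 1) 0).getD []))) = true := by
          intro hcond
          have hin := (Bool.and_eq_true _ _).mp hcond |>.2
          -- field_name in parts[0].lower() implies field_name in line.lower()
          have hinf : fl <:+: PySem.Chars.lower
              ((PySem.List.pyGet? (PySem.Chars.splitOnMax l [':'] 1) 0).getD []) :=
            (PySem.Chars.isIn_iff_infix _ _).mp hin
          have hpref : PySem.Chars.lower
              ((PySem.List.pyGet? (PySem.Chars.splitOnMax l [':'] 1) 0).getD []) <+:
              PySem.Chars.lower l := by
            simpa [PySem.Chars.lower] using (pvParts0_prefix l).map PySem.Chars.lowerChar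
          have : fl <:+: PySem.Chars.lower l := hinf.trans hpref.isInfix
          have : PySem.Chars.isIn fl (PySem.Chars.lower l) = true :=
            (PySem.Chars.isIn_iff_infix _ _).mpr this
          simp [this, hc] at h2
        rw [if_neg hfalse]
        exact ih h
      · rw [if_neg hc]
        exact ih h

-- ===== VERDICT (by name: the statement is the Claim_ definition above) =====
theorem extract_from_response_spec : Claim_equal_extract_from_response := by
  intro response field_name _
  unfold Spec_extract_from_response
  cases response with
  | none => rfl
  | some r =>
    by_cases hr : r.toList = []
    · simp [extract_from_response, extract_from_response_alt, hr]
    · simp only [extract_from_response, extract_from_response_alt, hr]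
      rw [pvFoldB_none]
      cases h1 : pvLoopA1 (PySem.Chars.lower field_name.toList)
          (PySem.Chars.splitOn (PySem.Chars.strip r.toList) ['\n']) with
      | some w => simp
      | none =>
        cases h2 : pvLoopA2 (PySem.Chars.lower field_name.toList)
            (PySem.Chars.splitOn (PySem.Chars.strip r.toList) ['\n']) with
        | some w => simp
        | none => simp [pvLoopA3_none _ _ h2]
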